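-- pv_equiv track=rewrite | github.com/fijjas/singularity | v4/graph_retriever.py | _common_stem
-- ===== SOURCE A (Python) =====
-- def _common_stem(a, b):
--     """Check if two words share a stem.
--
--     Two strategies:
--       - Common prefix >= 4 chars (write/writing, connect/connection)
--       - One contains the other and shorter >= 4 chars (silk/spider_silk)
--     """
--     if len(a) < 4 or len(b) < 4:
--         return a == b
--     # Containment: one word inside the other
--     if a in b or b in a:
--         return True
--     # Common prefix
--     prefix_len = 0
--     for ca, cb in zip(a, b):
--         if ca == cb:
--             prefix_len += 1
--         else:
--             break
--     return prefix_len >= 4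
-- ===== SOURCE B (Python) =====
-- def _common_stem(a, b):
--     """Check if two words share a stem (same behaviour, closed-form prefix test)."""
--     if len(a) < 4 or len(b) < 4:
--         return a == b
--     return a in b or b in a or a[:4] == b[:4]
-- ===== Notes on version B (the rewrite author's own statement) =====
-- stated objective: simpler
-- what changed: Replaces the character-by-character common-prefix counting loop with a single closed-form slice comparison a[:4] == b[:4], valid because the length guard guarantees both words have length >= 4.
import Mathlib
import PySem

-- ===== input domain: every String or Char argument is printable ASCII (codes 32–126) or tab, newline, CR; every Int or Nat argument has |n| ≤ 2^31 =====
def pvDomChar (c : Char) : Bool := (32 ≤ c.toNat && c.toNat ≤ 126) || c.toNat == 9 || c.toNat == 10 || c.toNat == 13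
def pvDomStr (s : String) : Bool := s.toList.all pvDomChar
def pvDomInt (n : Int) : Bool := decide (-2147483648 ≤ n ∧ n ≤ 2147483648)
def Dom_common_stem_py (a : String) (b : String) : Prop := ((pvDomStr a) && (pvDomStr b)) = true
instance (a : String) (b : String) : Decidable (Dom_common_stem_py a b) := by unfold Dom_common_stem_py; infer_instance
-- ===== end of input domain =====

-- B replaces A's character-by-character prefix-counting loop with the closed-form test a[:4] == b[:4] (simpler; valid because the length guard forces both lengths ≥ 4).


-- ===== PORT A =====
-- the 'for ca, cb in zip(a, b): if ca == cb: prefix_len += 1 else: break' loop, with its accumulator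
def commonStemPrefLoop : List (Char × Char) → Nat → Nat
  | [], n => n
  | (ca, cb) :: rest, n => if ca == cb then commonStemPrefLoop rest (n + 1) else n

def common_stem_py (a : String) (b : String) : Bool :=
  if PySem.Str.len a < 4 || PySem.Str.len b < 4 then
    a == b
  else if PySem.Str.isIn a b || PySem.Str.isIn b a then
    true
  else
    decide (4 ≤ commonStemPrefLoop (a.toList.zip b.toList) 0)

-- ===== PORT B =====
def common_stem_py_alt (a : String) (b : String) : Bool :=
  if PySem.Str.len a < 4 || PySem.Str.len b < 4 then
    a == b
  else
    PySem.Str.isIn a b || PySem.Str.isIn b a ||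
      (PySem.Str.slice a none (some 4) == PySem.Str.slice b none (some 4))

-- ===== PRECONDITION & SPEC =====
def Spec_common_stem_py (a : String) (b : String) (out : Bool) : Prop := out = common_stem_py_alt a b
instance (a : String) (b : String) (out : Bool) : Decidable (Spec_common_stem_py a b out) := by unfold Spec_common_stem_py; infer_instance

-- ===== CLAIM (what is proved, stated in full; the proofs are below) =====
def Claim_equal_common_stem_py : Prop := ∀ (a : String) (b : String), Dom_common_stem_py a b → Spec_common_stem_py a b (common_stem_py a b)

-- ===== LEMMAS AND PROOFS =====

theorem commonStemPrefLoop_acc_le (l : List (Char × Char)) (n : Nat) :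
    n ≤ commonStemPrefLoop l n := by
  induction l generalizing n with
  | nil => simp [commonStemPrefLoop]
  | cons p rest ih =>
    obtain ⟨ca, cb⟩ := p
    simp only [commonStemPrefLoop]
    split
    · exact le_trans (Nat.le_succ n) (ih (n + 1))
    · exact le_refl n

theorem commonStemPrefLoop_take (la lb : List Char) (k n : Nat)
    (ha : k ≤ la.length) (hb : k ≤ lb.length) :
    (k + n ≤ commonStemPrefLoop (la.zip lb) n) ↔ la.take k = lb.take k := by
  induction k generalizing la lb n with
  | zero =>
    simp [commonStemPrefLoop_acc_le]
  | succ k ih =>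
    match la, lb with
    | x :: la', y :: lb' =>
      simp only [List.length_cons, Nat.succ_le_succ_iff] at ha hb
      simp only [List.zip_cons_cons, commonStemPrefLoop, List.take_succ_cons]
      by_cases hxy : x = y
      · subst hxy
        simp only [beq_self_eq_true, if_true, List.cons.injEq, true_and]
        have h := ih la' lb' (n + 1) ha hb
        rw [← h]; omega
      · have hb : (x == y) = false := beq_eq_false_iff_ne.mpr hxy
        simp only [hb, Bool.false_eq_true, if_false, List.cons.injEq]
        constructor
        · intro h; omega
        · rintro ⟨h1, _⟩; exact absurd h1 hxy

theorem common_stem_py_spec : Claim_equal_common_stem_py := by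
  intro a b _
  unfold Spec_common_stem_py common_stem_py common_stem_py_alt
  simp only [PySem.Str.len_eq, PySem.Str.isIn_eq, String.length_toList]
  by_cases h4 : a.length < 4 ∨ b.length < 4
  · have hc : (decide ((a.length : Int) < 4) || decide ((b.length : Int) < 4)) = true := by
      rcases h4 with h | h
      · exact Bool.or_eq_true_iff.mpr (Or.inl (decide_eq_true (by exact_mod_cast h)))
      · exact Bool.or_eq_true_iff.mpr (Or.inr (decide_eq_true (by exact_mod_cast h)))
    rw [if_pos hc, if_pos hc]
  · rw [not_or, Nat.not_lt, Nat.not_lt] at h4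
    have hc : (decide ((a.length : Int) < 4) || decide ((b.length : Int) < 4)) = false := by
      simp only [Bool.or_eq_false_iff, decide_eq_false_iff_not, Int.not_lt]
      exact ⟨by exact_mod_cast h4.1, by exact_mod_cast h4.2⟩
    simp only [hc, Bool.false_eq_true, if_false]
    by_cases hin : (PySem.Chars.isIn a.toList b.toList || PySem.Chars.isIn b.toList a.toList) = true
    · simp [hin]
    · have hin' : (PySem.Chars.isIn a.toList b.toList || PySem.Chars.isIn b.toList a.toList) = false :=
        Bool.eq_false_iff.mpr hin
      simp only [hin, if_false, Bool.false_or, Bool.false_eq_true]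
      have hlen : 4 ≤ a.toList.length ∧ 4 ≤ b.toList.length :=
        ⟨by rw [String.length_toList]; exact h4.1,
         by rw [String.length_toList]; exact h4.2⟩
      have hslice : ∀ l : List Char, PySem.List.slice l none (some 4) = l.take 4 := by
        intro l
        rw [PySem.List.slice_to l (by norm_num : (0:Int) ≤ 4)]
        rfl
      rw [Bool.eq_iff_iff]
      simp only [decide_eq_true_eq, beq_iff_eq, ← String.toList_inj, PySem.Str.toList_slice,
        PySem.Chars.slice_eq_listSlice, hslice]
      simpa using commonStemPrefLoop_take a.toList b.toList 4 0 hlen.1 hlen.2
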